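-- pv_equiv track=rewrite | github.com/Asian-Pan-Genome/Centromere | HORmining/HiCAT_stat.py | search_start
-- ===== SOURCE A (Python) =====
-- def search_start(t):
--     min_value = min(t)
--     min_indices = [i for i, x in enumerate(t) if x == min_value]
--     min_index = min_indices[0]
--     for i in min_indices:
--         for j in range(1, len(t) - i):
--             if i + j >= len(t) or min_index + j >= len(t):
--                 break
--             if t[i + j] < t[min_index + j]:
--                 min_index = i
--                 break
--             elif t[i + j] > t[min_index + j]:
--                 break
--     return min_index
-- ===== SOURCE B (Python) =====
-- def search_start(t):
--     mv = min(t)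
--     n = len(t)
--     best = -1
--     for i, x in enumerate(t):
--         if x != mv:
--             continue
--         if best < 0 or t[i + 1:] < t[best + 1:best + n - i]:
--             best = i
--     return best
-- ===== Notes on version B (the rewrite author's own statement) =====
-- stated objective: simpler
-- what changed: Replaces A's min_indices list plus nested index-comparison loop with explicit break logic by a single enumerate pass that keeps the best start and compares candidate suffixes with one built-in lexicographic comparison of two equal-length slices.
import Mathlib
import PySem

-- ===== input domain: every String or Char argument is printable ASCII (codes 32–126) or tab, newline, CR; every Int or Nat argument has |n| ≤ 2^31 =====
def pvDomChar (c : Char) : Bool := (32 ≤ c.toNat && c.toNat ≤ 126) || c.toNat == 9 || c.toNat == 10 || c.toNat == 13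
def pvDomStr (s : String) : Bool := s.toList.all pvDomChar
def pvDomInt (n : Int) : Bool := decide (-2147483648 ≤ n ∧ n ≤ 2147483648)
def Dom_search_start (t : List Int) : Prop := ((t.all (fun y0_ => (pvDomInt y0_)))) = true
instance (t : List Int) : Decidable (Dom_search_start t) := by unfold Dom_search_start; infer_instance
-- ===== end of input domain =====

-- B replaces A's nested index-comparison loop by one enumerate pass that compares candidate
-- suffixes with a single lexicographic comparison of two equal-length slices (objective: simpler).

-- B replaces A's min_indices list and nested index-comparison loop by a single enumerate
-- pass comparing candidate suffixes with one lexicographic comparison of two equal-length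
-- slices (objective: simpler; same worst-case cost).

-- ===== PORT A =====
-- inner 'for j in range(1, len(t) - i)' loop of A, with its break/update cases
def searchInnerA (t : List Int) (minIdx i : Int) : List Int → Int
  | [] => minIdx
  | j :: js =>
    if i + j ≥ (t.length : Int) ∨ minIdx + j ≥ (t.length : Int) then minIdx
    else
      if PySem.List.pyGetD t (i + j) 0 < PySem.List.pyGetD t (minIdx + j) 0 then i
      else if PySem.List.pyGetD t (i + j) 0 > PySem.List.pyGetD t (minIdx + j) 0 then minIdx
      else searchInnerA t minIdx i js


def search_start (t : List Int) : Int :=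
  let min_value := (PySem.List.min? t (fun x => x)).getD 0
  let min_indices := ((PySem.List.enumerate t 0).filter (fun p => p.2 == min_value)).map (fun p => p.1)
  let min_index := PySem.List.pyGetD min_indices 0 0
  min_indices.foldl
    (fun m i => searchInnerA t m i (PySem.List.pyRange 1 ((t.length : Int) - i) 1)) min_index


-- ===== PORT B =====
-- Python's list '<' on lists of ints (strict lexicographic comparison)
def lexLt : List Int → List Int → Bool
  | _, [] => false
  | [], _ :: _ => true
  | a :: as, b :: bs => if a < b then true else if b < a then false else lexLt as bs


def search_start_alt (t : List Int) : Int :=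
  let mv := (PySem.List.min? t (fun x => x)).getD 0
  let n : Int := t.length
  (PySem.List.enumerate t 0).foldl
    (fun best p =>
      if p.2 == mv then
        if best < 0 ∨
            lexLt (PySem.List.slice t (some (p.1 + 1)) none)
                  (PySem.List.slice t (some (best + 1)) (some (best + n - p.1))) then p.1
        else best
      else best) (-1)


-- ===== PRECONDITION & SPEC =====
-- Pre_ excludes only the empty list, on which Python A raises ValueError (min() of empty sequence).
def Pre_search_start (t : List Int) : Prop := t ≠ []
instance (t : List Int) : Decidable (Pre_search_start t) := by unfold Pre_search_start; infer_instance
def pvWitness_search_start : List Int := [2, 1, 3, 1]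
def Spec_search_start (t : List Int) (out : Int) : Prop := out = search_start_alt t
instance (t : List Int) (out : Int) : Decidable (Spec_search_start t out) := by unfold Spec_search_start; infer_instance

-- ===== CLAIM (what is proved, stated in full; the proofs are below) =====
def Claim_equal_search_start : Prop := ∀ (t : List Int), Dom_search_start t → Pre_search_start t → Spec_search_start t (search_start t)

-- ===== LEMMAS AND PROOFS =====
theorem innerA_eq (t : List Int) (m i : Int) (d : Nat) :
    ∀ (k : Int), 0 ≤ m → m ≤ i → i < (t.length : Int) → 1 ≤ k →
    ((t.length : Int) - i - k).toNat = d →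
    searchInnerA t m i (PySem.List.pyRange k ((t.length : Int) - i) 1) =
      (if lexLt (t.drop (i + k).toNat)
          ((t.drop (m + k).toNat).take ((t.length : Int) - i - k).toNat) then i else m) := by
  induction d with
  | zero =>
    intro k h0 hmi hi hk hd
    rw [PySem.List.pyRange_one_eq_nil (by omega)]
    have h1 : t.drop (i + k).toNat = [] := List.drop_eq_nil_of_le (by omega)
    rw [h1, hd]
    simp [searchInnerA, lexLt]
  | succ d ih =>
    intro k h0 hmi hi hk hd
    have hkN : k < (t.length : Int) - i := by omega
    rw [PySem.List.pyRange_one_cons (by omega)]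
    have hik : (i + k).toNat < t.length := by omega
    have hmk : (m + k).toNat < t.length := by omega
    have e1 : t.drop (i + k).toNat = t[(i + k).toNat] :: t.drop ((i + k).toNat + 1) :=
      List.drop_eq_getElem_cons hik
    have e2 : t.drop (m + k).toNat = t[(m + k).toNat] :: t.drop ((m + k).toNat + 1) :=
      List.drop_eq_getElem_cons hmk
    rw [hd, e1, e2, List.take_succ_cons]
    show searchInnerA t m i (k :: _) = _
    rw [searchInnerA]
    rw [if_neg (by omega)]
    rw [PySem.List.pyGetD_eq_getElem t (i := i + k) 0 (by omega) (by omega),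
        PySem.List.pyGetD_eq_getElem t (i := m + k) 0 (by omega) (by omega)]
    rw [lexLt]
    by_cases hlt : t[(i + k).toNat] < t[(m + k).toNat]
    · simp [hlt]
    · rw [if_neg hlt, if_neg hlt]
      by_cases hgt : t[(m + k).toNat] < t[(i + k).toNat]
      · simp [hgt]
      · rw [if_neg (by simpa using hgt), if_neg hgt]
        have := ih (k + 1) h0 hmi hi (by omega) (by omega)
        rw [this]
        have a1 : (i + (k + 1)).toNat = (i + k).toNat + 1 := by omega
        have a2 : (m + (k + 1)).toNat = (m + k).toNat + 1 := by omega
        have a3 : ((t.length : Int) - i - (k + 1)).toNat = d := by omega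
        rw [a1, a2, a3]

-- generic: fold that skips non-P elements = fold over filter
theorem foldl_skip {α β : Type} (P : β → Bool) (f : α → β → α) :
    ∀ (l : List β) (a : α),
      l.foldl (fun acc x => if P x then f acc x else acc) a = (l.filter P).foldl f a := by
  intro l
  induction l with
  | nil => intro a; rfl
  | cons x xs ih =>
    intro a
    by_cases h : P x <;> simp [h, ih]

def cmpA (t : List Int) (m i : Int) : Int :=
  searchInnerA t m i (PySem.List.pyRange 1 ((t.length : Int) - i) 1)

def gB (t : List Int) (a x : Int) : Int :=
  if a < 0 ∨
      lexLt (PySem.List.slice t (some (x + 1)) none)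
            (PySem.List.slice t (some (a + 1)) (some (a + (t.length : Int) - x))) then x
  else a

theorem cmpA_eq (t : List Int) (m x : Int) (h0 : 0 ≤ m) (hmx : m ≤ x) (hx : x < (t.length : Int)) :
    cmpA t m x =
      (if lexLt (t.drop (x + 1).toNat)
          ((t.drop (m + 1).toNat).take ((t.length : Int) - x - 1).toNat) then x else m) := by
  exact innerA_eq t m x ((t.length : Int) - x - 1).toNat 1 h0 hmx hx (by omega) rfl

theorem gB_eq (t : List Int) (m x : Int) (h0 : 0 ≤ m) (hmx : m ≤ x) (hx : x < (t.length : Int)) :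
    gB t m x =
      (if lexLt (t.drop (x + 1).toNat)
          ((t.drop (m + 1).toNat).take ((t.length : Int) - x - 1).toNat) then x else m) := by
  unfold gB
  rw [PySem.List.slice_from t (a := x + 1) (by omega), PySem.List.slice_toNat t (a := m + 1) (b := m + (t.length : Int) - x) (by omega) (by omega)]
  have e : (m + (t.length : Int) - x).toNat - (m + 1).toNat = ((t.length : Int) - x - 1).toNat := by
    omega
  rw [e]
  by_cases hb : lexLt (t.drop (x + 1).toNat)
      ((t.drop (m + 1).toNat).take ((t.length : Int) - x - 1).toNat) = true
  · rw [if_pos (Or.inr hb), if_pos hb]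
  · rw [if_neg (not_or.mpr ⟨by omega, hb⟩), if_neg hb]

theorem fold_agree (t : List Int) :
    ∀ (l : List Int) (m : Int), 0 ≤ m → m < (t.length : Int) →
      (∀ x ∈ l, m ≤ x ∧ x < (t.length : Int)) → l.Pairwise (· ≤ ·) →
      l.foldl (gB t) m = l.foldl (cmpA t) m := by
  intro l
  induction l with
  | nil => intro m _ _ _ _; rfl
  | cons x xs ih =>
    intro m h0 hm hmem hpair
    have hx := hmem x (by simp)
    have hstep : gB t m x = cmpA t m x := by
      rw [gB_eq t m x h0 hx.1 hx.2, cmpA_eq t m x h0 hx.1 hx.2]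
    simp only [List.foldl_cons, hstep]
    rw [cmpA_eq t m x h0 hx.1 hx.2]
    rcases List.pairwise_cons.mp hpair with ⟨hxle, hpair'⟩
    by_cases hb : lexLt (t.drop (x + 1).toNat)
        ((t.drop (m + 1).toNat).take ((t.length : Int) - x - 1).toNat) = true
    · rw [if_pos hb]
      exact ih x (by omega) hx.2
        (fun y hy => ⟨hxle y hy, (hmem y (by simp [hy])).2⟩) hpair'
    · rw [if_neg hb]
      exact ih m h0 hm (fun y hy => hmem y (by simp [hy])) hpair'


theorem assemble (t : List Int) (M : List Int) (hne : M ≠ [])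
    (hMmem : ∀ x ∈ M, 0 ≤ x ∧ x < (t.length : Int))
    (hMpair : M.Pairwise (· < ·)) :
    M.foldl (cmpA t) (PySem.List.pyGetD M 0 0) = M.foldl (gB t) (-1) := by
  obtain ⟨h, rest, hcons⟩ := List.exists_cons_of_ne_nil hne
  subst hcons
  rw [PySem.List.pyGetD_zero_cons]
  have hh := hMmem h (by simp)
  have hrest : ∀ x ∈ rest, h ≤ x ∧ x < (t.length : Int) := by
    intro x hx
    have hlt := (List.pairwise_cons.mp hMpair).1 x hx
    exact ⟨le_of_lt hlt, (hMmem x (by simp [hx])).2⟩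
  have hpair' : rest.Pairwise (· ≤ ·) :=
    ((List.pairwise_cons.mp hMpair).2).imp le_of_lt
  simp only [List.foldl_cons]
  have hAh : cmpA t h h = h := by
    rw [cmpA_eq t h h hh.1 le_rfl hh.2]
    exact ite_self h
  have hBh : gB t (-1) h = h := by
    rw [gB]
    exact if_pos (Or.inl (by omega))
  rw [hAh, hBh]
  exact (fold_agree t rest h hh.1 hh.2 hrest hpair').symm

theorem main_eq (t : List Int) (hpre : t ≠ []) : search_start t = search_start_alt t := by
  have hA : search_start t =
      (((PySem.List.enumerate t 0).filter
          (fun p => p.2 == (PySem.List.min? t (fun x => x)).getD 0)).map (fun p => p.1)).foldl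
        (cmpA t)
        (PySem.List.pyGetD
          (((PySem.List.enumerate t 0).filter
              (fun p => p.2 == (PySem.List.min? t (fun x => x)).getD 0)).map (fun p => p.1)) 0 0) := rfl
  have hB : search_start_alt t =
      (((PySem.List.enumerate t 0).filter
          (fun p => p.2 == (PySem.List.min? t (fun x => x)).getD 0)).map (fun p => p.1)).foldl
        (gB t) (-1) := by
    show (PySem.List.enumerate t 0).foldl
      (fun (best : Int) (p : Int × Int) =>
        if p.2 == (PySem.List.min? t (fun x => x)).getD 0 then
          if best < 0 ∨
              lexLt (PySem.List.slice t (some (p.1 + 1)) none)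
                    (PySem.List.slice t (some (best + 1)) (some (best + (t.length : Int) - p.1))) then p.1
          else best
        else best) (-1) = _
    rw [foldl_skip (fun (p : Int × Int) => p.2 == (PySem.List.min? t (fun x => x)).getD 0)
      (fun (best : Int) (p : Int × Int) =>
        if best < 0 ∨
            lexLt (PySem.List.slice t (some (p.1 + 1)) none)
                  (PySem.List.slice t (some (best + 1)) (some (best + (t.length : Int) - p.1))) then p.1
        else best)]
    rw [List.foldl_map]
    rfl
  rw [hA, hB]
  apply assemble
  · -- nonempty
    have hsome : ∃ m0, PySem.List.min? t (fun x => x) = some m0 := by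
      cases h : PySem.List.min? t (fun x => x) with
      | none => exact absurd ((PySem.List.min?_eq_none_iff t (fun x => x)).mp h) hpre
      | some m0 => exact ⟨m0, rfl⟩
    rcases hsome with ⟨m0, hm0⟩
    have hmem : (PySem.List.min? t (fun x => x)).getD 0 ∈ t := by
      rw [hm0]
      exact PySem.List.min?_mem hm0
    rcases List.mem_iff_getElem.mp hmem with ⟨k, hk, hkv⟩
    have hpe : ((k : Int), t[k]) ∈ PySem.List.enumerate t 0 := by
      rw [PySem.List.mem_enumerate_iff]
      exact ⟨k, hk, by simp⟩
    intro hMnil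
    rw [List.map_eq_nil_iff, List.filter_eq_nil_iff] at hMnil
    exact absurd (by simp [hkv]) (hMnil _ hpe)
  · -- bounds
    intro x hx
    rcases List.mem_map.mp hx with ⟨p, hpL, hpx⟩
    have hpe : p ∈ PySem.List.enumerate t 0 := (List.mem_filter.mp hpL).1
    rcases (PySem.List.mem_enumerate_iff t 0 p).mp hpe with ⟨k, hk, hpk⟩
    subst hpk
    simp at hpx
    omega
  · -- pairwise
    rw [List.pairwise_map]
    exact (PySem.List.pairwise_lt_enumerate t 0).filter _

-- ===== VERDICT (by name: the statement is the Claim_ definition above) =====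
theorem search_start_spec : Claim_equal_search_start := by
  intro t _ hpre
  unfold Spec_search_start
  exact main_eq t hpre
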